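-- pv_equiv track=rewrite | github.com/delanoholanda/producao_uni | app/functions/process_pdf.py | tratarTextoExtraido
-- ===== SOURCE A (Python) =====
-- def tratarTextoExtraido(texto, lista_diferentes_lotes, lista_diferentes_codigos):
--
--     # Dividir o texto em linhas
--     linhas_texto = texto.split('\n')
--
--     # ##### Inicio junção das linhas que iniciam com lote com as que iniciam com codigos
--
--     # Variável para armazenar as linhas unidas
--     linhas_unidas = []
--
--     # Loop para percorrer as linhas
--     i = 0
--     while i < len(linhas_texto):
--         if linhas_texto[i].startswith(tuple(lista_diferentes_lotes)):
--         # if any(linha[i].startswith(valor) for valor in valores_verificar):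
--             # Copiar a linha que começa com "20223"
--             linhas_texto[i] = ' '.join(linhas_texto[i].rsplit(' ', 1)[:-1])
--             linha_base = linhas_texto[i]
--             j = 1
--             while i + j < len(linhas_texto) and linhas_texto[i + j].startswith(tuple(lista_diferentes_codigos)):
--                 # Se a próxima linha inicia com "5000510", "5000518", "5000061" ou "5000517", criar uma nova linha
--                 nova_linha = linha_base + " " + linhas_texto[i + j]
--                 if j == 1:
--                     nova_linha = ' '.join(nova_linha.rsplit(' ', 1)[:-1])
--                 linhas_unidas.append(nova_linha)
--                 j += 1
--             # Caso não encontre linhas com "5000510", "5000518", "5000061" ou "5000517", adicionar a linha original à lista de linhas unidas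
--             if j == 1:
--                 linhas_unidas.append(linha_base)
--             i += j
--         else:
--             # Caso a linha não inicie com "20223", apenas adicioná-la às linhas unidas
--             linhas_unidas.append(linhas_texto[i])
--             i += 1
--
--     # Juntar as linhas unidas novamente em um único texto
--     texto_processado = '\n'.join(linhas_unidas)
--
--     texto_processado = texto_processado.replace("Lote Nota Data Beneficiário Total Código Qt. Cobr Qt. Paga Valor Qtd CH Subtotal", "Lote Nota Data Hora Lixo1 Beneficiário Código Qtd.Paga Lixo2 Valor Lixo3 Lixo4 Lixo5 Lixo6")
--
--     return texto_processado
-- ===== SOURCE B (Python) =====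
-- def tratarTextoExtraido(texto, lista_diferentes_lotes, lista_diferentes_codigos):
--     lotes = tuple(lista_diferentes_lotes)
--     codigos = tuple(lista_diferentes_codigos)
--
--     def base_of(linha):
--         # everything before the last space (empty if there is no space)
--         return ' '.join(linha.rsplit(' ', 1)[:-1])
--
--     def merged(linhas):
--         # single flat pass: em = inside a lot, first = no code line joined yet
--         em, first, base = False, True, ''
--         for linha in linhas:
--             if em and linha.startswith(codigos):
--                 nova = base + ' ' + linha
--                 yield base_of(nova) if first else nova
--                 first = False
--             elif linha.startswith(lotes):
--                 if em and first:
--                     yield base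
--                 em, first, base = True, True, base_of(linha)
--             else:
--                 if em and first:
--                     yield base
--                 em, first = False, True
--                 yield linha
--         if em and first:
--             yield base
--
--     texto_processado = '\n'.join(merged(texto.split('\n')))
--     return texto_processado.replace("Lote Nota Data Beneficiário Total Código Qt. Cobr Qt. Paga Valor Qtd CH Subtotal", "Lote Nota Data Hora Lixo1 Beneficiário Código Qtd.Paga Lixo2 Valor Lixo3 Lixo4 Lixo5 Lixo6")
-- ===== Notes on version B (the rewrite author's own statement) =====
-- stated objective: simpler
-- what changed: Replaced the nested while loops with index arithmetic (i, j, i += j) by a single flat pass over the lines as a generator with three state variables (in-lot flag, first-code flag, current base), with one flush rule applied uniformly.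
import Mathlib
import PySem

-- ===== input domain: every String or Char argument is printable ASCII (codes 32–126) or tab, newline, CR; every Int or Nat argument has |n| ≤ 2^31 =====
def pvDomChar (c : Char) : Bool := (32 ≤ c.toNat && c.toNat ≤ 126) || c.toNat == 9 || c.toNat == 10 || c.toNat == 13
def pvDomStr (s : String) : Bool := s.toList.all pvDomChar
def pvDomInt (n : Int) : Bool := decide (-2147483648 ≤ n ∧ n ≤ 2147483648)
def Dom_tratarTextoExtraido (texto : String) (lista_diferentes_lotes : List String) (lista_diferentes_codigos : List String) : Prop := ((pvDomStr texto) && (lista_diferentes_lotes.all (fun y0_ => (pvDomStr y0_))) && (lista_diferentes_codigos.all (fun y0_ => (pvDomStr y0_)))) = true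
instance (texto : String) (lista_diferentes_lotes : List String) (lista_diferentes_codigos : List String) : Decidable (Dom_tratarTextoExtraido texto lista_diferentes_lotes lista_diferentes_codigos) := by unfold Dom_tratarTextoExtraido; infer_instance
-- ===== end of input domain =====

-- B replaces A's nested while loops with index jumps by a single flat pass with state variables (simpler decomposition, same O(n) cost).


-- ===== PORT A =====
-- s.startswith(tuple(ps)): any prefix in ps matches (False for the empty tuple)
def pvStartsAny (s : String) (ps : List String) : Bool := ps.any (fun p => PySem.Str.startswith s p)

-- ' '.join(s.rsplit(' ', 1)[:-1]) — PySem has no rsplit, ported by hand: the part of s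
-- strictly before the LAST space, or "" when s contains no space (exact for every string).
def pvRsplitDrop (s : String) : String :=
  let i := PySem.Str.rfind s " "
  if i = -1 then "" else String.ofList (s.toList.take i.toNat)

-- the inner `while` loop of A: consumes consecutive code-lines, returning the appended
-- new lines, the unconsumed rest, and the final value of the counter j
def pvInnerA (codigos : List String) (linha_base : String) (j : Nat) :
    List String → (List String × List String × Nat)
  | [] => ([], [], j)
  | l :: t =>
    if pvStartsAny l codigos then
      let nova := linha_base ++ " " ++ l
      let nova := if j = 1 then pvRsplitDrop nova else nova
      let res := pvInnerA codigos linha_base (j + 1) t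
      (nova :: res.1, res.2.1, res.2.2)
    else ([], l :: t, j)

theorem pvInnerA_rest_len (codigos : List String) (linha_base : String) (j : Nat)
    (xs : List String) : (pvInnerA codigos linha_base j xs).2.1.length ≤ xs.length := by
  induction xs generalizing j with
  | nil => simp [pvInnerA]
  | cons l t ih =>
    simp only [pvInnerA]
    split
    · exact Nat.le_succ_of_le (ih (j + 1))
    · simp

-- the outer `while` loop of A
def pvLoopA (lotes codigos : List String) : List String → List String
  | [] => []
  | l :: t =>
    if pvStartsAny l lotes then
      let linha_base := pvRsplitDrop l
      let res := pvInnerA codigos linha_base 1 t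
      res.1 ++ (if res.2.2 = 1 then [linha_base] else []) ++ pvLoopA lotes codigos res.2.1
    else l :: pvLoopA lotes codigos t
termination_by xs => xs.length
decreasing_by
  · exact Nat.lt_succ_of_le (pvInnerA_rest_len codigos (pvRsplitDrop l) 1 t)
  · simp

-- texto.split('\n') — sep "\n" is non-empty, so Chars.splitOn is exact
def pvSplitNL (s : String) : List String :=
  (PySem.Chars.splitOn s.toList ['\n']).map String.ofList

def tratarTextoExtraido (texto : String) (lista_diferentes_lotes : List String) (lista_diferentes_codigos : List String) : String :=
  let linhas_texto := pvSplitNL texto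
  let linhas_unidas := pvLoopA lista_diferentes_lotes lista_diferentes_codigos linhas_texto
  let texto_processado := PySem.Str.join "\n" linhas_unidas
  PySem.Str.replace texto_processado "Lote Nota Data Beneficiário Total Código Qt. Cobr Qt. Paga Valor Qtd CH Subtotal" "Lote Nota Data Hora Lixo1 Beneficiário Código Qtd.Paga Lixo2 Valor Lixo3 Lixo4 Lixo5 Lixo6"

-- ===== PORT B =====
-- B's single flat pass (the generator `merged`): em = inside a lot, first = no code line
-- joined yet, base = current lot base; the pending bare lot-line is flushed uniformly.
def pvLoopB (lotes codigos : List String) (em first : Bool) (base : String) :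
    List String → List String
  | [] => if em && first then [base] else []
  | l :: t =>
    if em && pvStartsAny l codigos then
      let nova := base ++ " " ++ l
      (if first then pvRsplitDrop nova else nova) :: pvLoopB lotes codigos em false base t
    else if pvStartsAny l lotes then
      (if em && first then [base] else []) ++ pvLoopB lotes codigos true true (pvRsplitDrop l) t
    else
      (if em && first then [base] else []) ++ l :: pvLoopB lotes codigos false true base t

def tratarTextoExtraido_alt (texto : String) (lista_diferentes_lotes : List String) (lista_diferentes_codigos : List String) : String :=
  let texto_processado := PySem.Str.join "\n"
    (pvLoopB lista_diferentes_lotes lista_diferentes_codigos false true "" (pvSplitNL texto))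
  PySem.Str.replace texto_processado "Lote Nota Data Beneficiário Total Código Qt. Cobr Qt. Paga Valor Qtd CH Subtotal" "Lote Nota Data Hora Lixo1 Beneficiário Código Qtd.Paga Lixo2 Valor Lixo3 Lixo4 Lixo5 Lixo6"

-- ===== PRECONDITION & SPEC =====
def Spec_tratarTextoExtraido (texto : String) (lista_diferentes_lotes : List String) (lista_diferentes_codigos : List String) (out : String) : Prop := out = tratarTextoExtraido_alt texto lista_diferentes_lotes lista_diferentes_codigos
instance (texto : String) (lista_diferentes_lotes : List String) (lista_diferentes_codigos : List String) (out : String) : Decidable (Spec_tratarTextoExtraido texto lista_diferentes_lotes lista_diferentes_codigos out) := by unfold Spec_tratarTextoExtraido; infer_instance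

-- ===== CLAIM (what is proved, stated in full; the proofs are below) =====
def Claim_equal_tratarTextoExtraido : Prop := ∀ (texto : String) (lista_diferentes_lotes : List String) (lista_diferentes_codigos : List String), Dom_tratarTextoExtraido texto lista_diferentes_lotes lista_diferentes_codigos → Spec_tratarTextoExtraido texto lista_diferentes_lotes lista_diferentes_codigos (tratarTextoExtraido texto lista_diferentes_lotes lista_diferentes_codigos)

-- ===== LEMMAS AND PROOFS =====

theorem pvInnerA_j_le (codigos : List String) (base : String) (j : Nat) (xs : List String) :
    j ≤ (pvInnerA codigos base j xs).2.2 := by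
  induction xs generalizing j with
  | nil => simp [pvInnerA]
  | cons l t ih =>
    simp only [pvInnerA]
    split
    · exact Nat.le_of_succ_le (ih (j + 1))
    · simp

theorem pvLoopA_cons (lotes codigos : List String) (l : String) (t : List String) :
    pvLoopA lotes codigos (l :: t) =
      if pvStartsAny l lotes then
        (pvInnerA codigos (pvRsplitDrop l) 1 t).1 ++
          (if (pvInnerA codigos (pvRsplitDrop l) 1 t).2.2 = 1 then [pvRsplitDrop l] else []) ++
          pvLoopA lotes codigos (pvInnerA codigos (pvRsplitDrop l) 1 t).2.1
      else l :: pvLoopA lotes codigos t := by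
  rw [pvLoopA.eq_def]

-- the three loop states, related simultaneously by strong induction on the line count
theorem pv_states (lotes codigos : List String) :
    ∀ (n : Nat) (xs : List String), xs.length ≤ n →
      ((∀ b, pvLoopA lotes codigos xs = pvLoopB lotes codigos false true b xs) ∧
       (∀ base,
          (pvInnerA codigos base 1 xs).1 ++
            (if (pvInnerA codigos base 1 xs).2.2 = 1 then [base] else []) ++
            pvLoopA lotes codigos (pvInnerA codigos base 1 xs).2.1
          = pvLoopB lotes codigos true true base xs) ∧
       (∀ base (j : Nat), 2 ≤ j →
          (pvInnerA codigos base j xs).1 ++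
            pvLoopA lotes codigos (pvInnerA codigos base j xs).2.1
          = pvLoopB lotes codigos true false base xs)) := by
  intro n
  induction n with
  | zero =>
    intro xs hxs
    have hx : xs = [] := List.length_eq_zero_iff.mp (Nat.le_zero.mp hxs)
    subst hx
    exact ⟨fun b => by rw [pvLoopA.eq_def]; simp [pvLoopB],
      fun base => by rw [pvLoopA.eq_def]; simp [pvInnerA, pvLoopB],
      fun base j hj => by rw [pvLoopA.eq_def]; simp [pvInnerA, pvLoopB]⟩
  | succ n ih =>
    intro xs hxs
    match xs with
    | [] =>
      exact ⟨fun b => by rw [pvLoopA.eq_def]; simp [pvLoopB],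
        fun base => by rw [pvLoopA.eq_def]; simp [pvInnerA, pvLoopB],
        fun base j hj => by rw [pvLoopA.eq_def]; simp [pvInnerA, pvLoopB]⟩
    | l :: t =>
      have ht : t.length ≤ n := Nat.le_of_succ_le_succ hxs
      obtain ⟨P, Q, R⟩ := ih t ht
      refine ⟨?_, ?_, ?_⟩
      · -- state: not in a lot
        intro b
        rw [pvLoopA_cons]
        by_cases hl : pvStartsAny l lotes
        · simp only [pvLoopB, hl, Bool.false_and, if_neg, if_pos, Bool.not_eq_true]
          simp [Q (pvRsplitDrop l)]
        · simp only [pvLoopB, hl, Bool.false_and]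
          simp [P b]
      · -- state: in a lot, first code line not yet seen
        intro base
        by_cases hc : pvStartsAny l codigos
        · have h2 := R base 2 (Nat.le_refl 2)
          have hj2 : ¬ (pvInnerA codigos base 2 t).2.2 = 1 := by
            have := pvInnerA_j_le codigos base 2 t; omega
          simp only [pvInnerA, pvLoopB, hc, Bool.true_and, if_pos]
          simp [hj2, h2]
        · -- l does not start with a code prefix: the inner loop stops, flush base
          simp only [pvInnerA, pvLoopB, hc, Bool.true_and, Bool.and_self, if_neg, Bool.not_eq_true]
          rw [pvLoopA_cons]
          by_cases hl : pvStartsAny l lotes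
          · simp only [hl, if_pos]
            simp [Q (pvRsplitDrop l)]
          · simp only [hl, if_neg, Bool.not_eq_true]
            simp [P base]
      · -- state: in a lot, at least one code line already joined
        intro base j hj
        by_cases hc : pvStartsAny l codigos
        · have h2 := R base (j + 1) (by omega)
          have hjne : ¬ j = 1 := by omega
          simp only [pvInnerA, pvLoopB, hc, Bool.true_and, if_pos]
          simp [hjne, h2]
        · simp only [pvInnerA, pvLoopB, hc, Bool.true_and, if_neg, Bool.not_eq_true]
          rw [pvLoopA_cons]
          by_cases hl : pvStartsAny l lotes
          · simp only [hl, if_pos]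
            simp [Q (pvRsplitDrop l)]
          · simp only [hl, if_neg, Bool.not_eq_true]
            simp [P base]

theorem pvLoopA_eq_pvLoopB (lotes codigos : List String) (xs : List String) :
    pvLoopA lotes codigos xs = pvLoopB lotes codigos false true "" xs :=
  (pv_states lotes codigos xs.length xs (Nat.le_refl _)).1 ""

-- ===== VERDICT (by name: the statement is the Claim_ definition above) =====
theorem tratarTextoExtraido_spec : Claim_equal_tratarTextoExtraido := by
  intro texto lotes codigos _
  simp only [Spec_tratarTextoExtraido, tratarTextoExtraido, tratarTextoExtraido_alt,
    pvLoopA_eq_pvLoopB]
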